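-- pv_equiv track=rewrite | github.com/melohub-xbit/MetaOpenEnv_MutantHunter | src/mutant_hunter/corpus/_local/mini_calendar/parser.py | from_ordinal
-- ===== SOURCE A (Python) =====
-- from typing import Tuple
--
-- Date = Tuple[int, int, int]
--
-- MIN_YEAR = 1
--
-- MAX_YEAR = 9999
--
-- _CUM_DAYS_NORMAL: tuple[int, ...] = (0, 31, 59, 90, 120, 151, 181, 212, 243, 273, 304, 334)
--
-- _CUM_DAYS_LEAP: tuple[int, ...] = (0, 31, 60, 91, 121, 152, 182, 213, 244, 274, 305, 335)
--
-- def is_leap_year(year: int) -> bool: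
--     """Return True iff ``year`` is a Gregorian leap year.
--
--     A year is a leap year iff it is divisible by 4, except centuries that
--     are not divisible by 400. So 2000 is a leap year, 1900 is not.
--     """
--     if year % 4 != 0:
--         return False
--     if year % 100 != 0:
--         return True
--     return year % 400 == 0
--
-- def from_ordinal(year: int, ordinal: int) -> Date:
--     """Inverse of :func:`ordinal_day`.
--
--     Given ``(year, day_of_year)``, return the ``(Y, M, D)`` triple.
--     """
--     if year < MIN_YEAR or year > MAX_YEAR:
--         raise ValueError(f"year out of range: {year}")
--     days_in_year = 366 if is_leap_year(year) else 365
--     if ordinal < 1 or ordinal > days_in_year: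
--         raise ValueError(f"ordinal {ordinal} outside 1..{days_in_year} for year {year}")
--     cum = _CUM_DAYS_LEAP if is_leap_year(year) else _CUM_DAYS_NORMAL
--     # Walk months down from December until the cumulative days-before-month
--     # is strictly less than the ordinal — that's the month we're in.
--     month = 12
--     while month > 1 and cum[month - 1] >= ordinal:
--         month -= 1
--     day = ordinal - cum[month - 1]
--     return (year, month, day)
-- ===== SOURCE B (Python) =====
-- def from_ordinal(year, ordinal):
--     if year < 1 or year > 9999:
--         raise ValueError(f"year out of range: {year}")
--     leap = year % 4 == 0 and (year % 100 != 0 or year % 400 == 0)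
--     days_in_year = 366 if leap else 365
--     if ordinal < 1 or ordinal > days_in_year:
--         raise ValueError(f"ordinal {ordinal} outside 1..{days_in_year} for year {year}")
--     lengths = (31, 29 if leap else 28, 31, 30, 31, 30, 31, 31, 30, 31, 30, 31)
--     month = 1
--     remaining = ordinal
--     for length in lengths:
--         if remaining <= length:
--             break
--         remaining -= length
--         month += 1
--     return (year, month, remaining)
-- ===== Notes on version B (the rewrite author's own statement) =====
-- stated objective: idiomatic
-- what changed: Replaced the precomputed cumulative-days tables and the December-down while loop with a 12-element month-lengths tuple scanned forward, subtracting each month's length from a remaining-days accumulator until the ordinal fits.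
import Mathlib
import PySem

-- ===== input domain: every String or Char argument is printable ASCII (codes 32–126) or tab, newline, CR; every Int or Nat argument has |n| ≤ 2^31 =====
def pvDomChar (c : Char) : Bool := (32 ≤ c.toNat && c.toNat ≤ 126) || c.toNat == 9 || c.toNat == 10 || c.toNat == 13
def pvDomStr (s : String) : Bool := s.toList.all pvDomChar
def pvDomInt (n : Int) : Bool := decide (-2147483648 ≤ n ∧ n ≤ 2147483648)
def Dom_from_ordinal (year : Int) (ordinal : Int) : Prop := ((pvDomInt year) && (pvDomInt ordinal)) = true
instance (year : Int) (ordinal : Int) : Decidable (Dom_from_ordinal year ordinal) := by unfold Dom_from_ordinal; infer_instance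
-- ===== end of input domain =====

set_option maxRecDepth 4000
set_option maxHeartbeats 1000000


-- B replaces A's cumulative-days tables and December-down while loop with a forward
-- scan over a month-lengths tuple and a subtraction accumulator (idiomatic; same cost).

-- ===== PORT A =====
def cumDaysNormal : List Int := [0, 31, 59, 90, 120, 151, 181, 212, 243, 273, 304, 334]
def cumDaysLeap : List Int := [0, 31, 60, 91, 121, 152, 182, 213, 244, 274, 305, 335]

def is_leap_year (year : Int) : Bool :=
  if PySem.Int.mod year 4 ≠ 0 then false
  else if PySem.Int.mod year 100 ≠ 0 then true
  else PySem.Int.mod year 400 == 0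

-- A's `while month > 1 and cum[month-1] >= ordinal: month -= 1`; fuel 11 suffices
-- (month starts at 12 and each iteration decrements it, so ≤ 11 iterations).
-- cum[month-1] is always in range here, so `.getD 0` is exact.
def aWhile (cum : List Int) (ordinal : Int) : Nat → Int → Int
  | 0, month => month
  | fuel + 1, month =>
      if month > 1 ∧ (PySem.List.pyGet? cum (month - 1)).getD 0 ≥ ordinal then
        aWhile cum ordinal fuel (month - 1)
      else month

def from_ordinal (year : Int) (ordinal : Int) : Int × Int × Int :=
  -- the two ValueError paths are excluded by Pre_from_ordinal
  let cum := if is_leap_year year then cumDaysLeap else cumDaysNormal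
  let month := aWhile cum ordinal 11 12
  let day := ordinal - (PySem.List.pyGet? cum (month - 1)).getD 0
  (year, month, day)

-- ===== PORT B =====
def monthLengths (leap : Bool) : List Int :=
  [31, if leap then 29 else 28, 31, 30, 31, 30, 31, 31, 30, 31, 30, 31]

-- B's `for length in lengths: if remaining <= length: break; remaining -= length; month += 1`
def bScan : List Int → Int → Int → Int × Int
  | [], month, remaining => (month, remaining)
  | length :: rest, month, remaining =>
      if remaining ≤ length then (month, remaining)
      else bScan rest (month + 1) (remaining - length)

def from_ordinal_alt (year : Int) (ordinal : Int) : Int × Int × Int :=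
  -- the two ValueError paths are excluded by Pre_from_ordinal
  let leap := PySem.Int.mod year 4 == 0 &&
              (PySem.Int.mod year 100 ≠ 0 || PySem.Int.mod year 400 == 0)
  let (month, remaining) := bScan (monthLengths leap) 1 ordinal
  (year, month, remaining)

-- ===== PRECONDITION & SPEC =====
-- Pre_: exactly the inputs on which A returns (both ValueError paths excluded).
def pvLeapB (year : Int) : Bool :=
  year.fmod 4 == 0 && (year.fmod 100 ≠ 0 || year.fmod 400 == 0)

def Pre_from_ordinal (year : Int) (ordinal : Int) : Prop :=
  1 ≤ year ∧ year ≤ 9999 ∧ 1 ≤ ordinal ∧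
    ordinal ≤ (if pvLeapB year then 366 else 365)
instance (year : Int) (ordinal : Int) : Decidable (Pre_from_ordinal year ordinal) := by
  unfold Pre_from_ordinal; infer_instance

def pvWitness_from_ordinal : Int × Int := (2024, 60)

def Spec_from_ordinal (year : Int) (ordinal : Int) (out : Int × Int × Int) : Prop :=
  out = from_ordinal_alt year ordinal
instance (year : Int) (ordinal : Int) (out : Int × Int × Int) :
    Decidable (Spec_from_ordinal year ordinal out) := by
  unfold Spec_from_ordinal; infer_instance

-- ===== CLAIM (what is proved, stated in full; the proofs are below) =====
def Claim_equal_from_ordinal : Prop := ∀ (year : Int) (ordinal : Int),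
  Dom_from_ordinal year ordinal → Pre_from_ordinal year ordinal →
    Spec_from_ordinal year ordinal (from_ordinal year ordinal)

-- ===== LEMMAS AND PROOFS =====

theorem leap_eq (year : Int) : is_leap_year year = pvLeapB year := by
  simp only [is_leap_year, pvLeapB, PySem.Int.mod]
  by_cases h4 : year.fmod 4 = 0 <;> by_cases h100 : year.fmod 100 = 0 <;>
    simp [h4, h100]

-- core computation agreement, for each leap flag and each admissible ordinal
theorem core_eq (leap : Bool) (n : Nat) (hn : n < if leap then 366 else 365) :
    (let cum := if leap then cumDaysLeap else cumDaysNormal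
     let month := aWhile cum ((n : Int) + 1) 11 12
     (month, (n : Int) + 1 - (PySem.List.pyGet? cum (month - 1)).getD 0)) =
      bScan (monthLengths leap) 1 ((n : Int) + 1) := by
  revert hn
  cases leap <;> revert n <;> decide

-- ===== VERDICT (by name: the statement is the Claim_ definition above) =====
theorem from_ordinal_spec : Claim_equal_from_ordinal := by
  intro year ordinal _ hPre
  obtain ⟨_, _, h1, h2⟩ := hPre
  unfold Spec_from_ordinal from_ordinal from_ordinal_alt
  have hleapb : (PySem.Int.mod year 4 == 0 &&
      (PySem.Int.mod year 100 ≠ 0 || PySem.Int.mod year 400 == 0)) = pvLeapB year := by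
    simp only [pvLeapB, PySem.Int.mod]; rfl
  rw [leap_eq, hleapb]
  obtain ⟨n, rfl⟩ : ∃ n : Nat, ordinal = (n : Int) + 1 := by
    refine ⟨(ordinal - 1).toNat, ?_⟩; omega
  have hn : n < if pvLeapB year then 366 else 365 := by
    by_cases h : pvLeapB year <;> simp [h] at h2 ⊢ <;> omega
  have hc := core_eq (pvLeapB year) n hn
  simp only at hc
  rcases hbs : bScan (monthLengths (pvLeapB year)) 1 ((n : Int) + 1) with ⟨m, r⟩
  rw [hbs] at hc
  simp only [Prod.mk.injEq] at hc
  obtain ⟨hm, hr⟩ := hc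
  rw [hm] at hr
  simp only [hbs, hm, hr]
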